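-- pv_equiv track=rewrite | github.com/miliar/Code_Jam_Webscraper | solutions_python/Problem_155/2234.py | check_applause
-- ===== SOURCE A (Python) =====
-- def check_applause(n, l):
-- 	total = 0
-- 	friends = 0
-- 	for i in range(len(l)):
-- 		#print i, str[i], total, friends
-- 		if total >= i:
-- 			total += int(l[i])
-- 		elif int(l[i]) > 0:
-- 			friends = friends + (i - total)
-- 			total = i + int(l[i])
-- 		#print i, str[i], total, friends
-- 	return friends
-- ===== SOURCE B (Python) =====
-- def check_applause(n, l):
--     vs = [int(x) for x in l]
--     sums = [0]
--     for v in vs: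
--         sums.append(sums[-1] + v)
--     cands = [i - s for (i, (v, s)) in enumerate(zip(vs, sums)) if v > 0]
--     return max(cands + [0])
-- ===== Notes on version B (the rewrite author's own statement) =====
-- stated objective: alternative
-- what changed: Replaces A's single-pass two-variable greedy state machine with three staged passes: parse all counts, build an explicit prefix-sums list, then take the maximum of the deficits i - sums[i] over the positive positions (with 0 as floor).
-- outside the precondition, e.g. on check_applause(4, ['0', '-5', '1', '1']): A returns 2, B returns 7
import Mathlib
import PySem

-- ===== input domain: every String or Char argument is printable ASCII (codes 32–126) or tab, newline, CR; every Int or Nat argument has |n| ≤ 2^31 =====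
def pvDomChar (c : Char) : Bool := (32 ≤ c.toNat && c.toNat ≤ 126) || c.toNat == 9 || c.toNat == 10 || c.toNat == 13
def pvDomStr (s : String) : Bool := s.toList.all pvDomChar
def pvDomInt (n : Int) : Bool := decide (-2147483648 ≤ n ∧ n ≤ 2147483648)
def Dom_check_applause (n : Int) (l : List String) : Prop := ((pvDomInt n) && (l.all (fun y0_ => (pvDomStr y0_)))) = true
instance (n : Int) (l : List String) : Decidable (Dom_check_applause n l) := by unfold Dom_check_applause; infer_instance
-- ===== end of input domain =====

-- B replaces A's greedy state machine by three staged passes: parse, prefix-sums list, max of deficits (alternative decomposition).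


-- ===== PORT A =====
-- loop over i in range(len(l)) with state (total, friends); int(l[i]) = PySem.Int.ofStr?,
-- total under Pre_ (every element parses); .getD 0 is never the raising case inside Pre_
def check_applause_goA (i total friends : Int) : List String → Int
  | [] => friends
  | x :: xs =>
    let v := (PySem.Int.ofStr? x).getD 0
    if total ≥ i then check_applause_goA (i + 1) (total + v) friends xs
    else if v > 0 then check_applause_goA (i + 1) (i + v) (friends + (i - total)) xs
    else check_applause_goA (i + 1) total friends xs

def check_applause (n : Int) (l : List String) : Int :=
  check_applause_goA 0 0 0 l

-- ===== PORT B =====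
-- vs = [int(x) for x in l]; sums built by appending sums[-1]+v; cands by comprehension over
-- enumerate(zip(vs, sums)); result = max(cands + [0]) (a nonempty list, so Python's max returns).
def check_applause_alt (n : Int) (l : List String) : Int :=
  let vs := l.map (fun x => (PySem.Int.ofStr? x).getD 0)
  let sums := vs.foldl (fun acc v => acc ++ [PySem.List.pyGetD acc (-1) 0 + v]) [0]
  let cands := (PySem.List.enumerate (vs.zip sums) 0).filterMap
      (fun p => if p.2.1 > 0 then some (p.1 - p.2.2) else none)
  match cands ++ [0] with
  | c :: cs => cs.foldl max c
  | [] => 0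

-- ===== PRECONDITION & SPEC =====
-- Pre_ excludes elements that do not parse as int (there A raises ValueError), and lists containing
-- a negative count, which lie outside the problem's natural domain of shyness counts and on which
-- A's greedy (which silently skips a negative value when total < i) diverges from the formula.
def Pre_check_applause (n : Int) (l : List String) : Prop :=
  ∀ x ∈ l, (PySem.Int.ofStr? x).isSome = true ∧ 0 ≤ (PySem.Int.ofStr? x).getD 0
instance (n : Int) (l : List String) : Decidable (Pre_check_applause n l) := by
  unfold Pre_check_applause; infer_instance

def pvWitness_check_applause : Int × List String := (3, ["0", "1", "1"])

def Spec_check_applause (n : Int) (l : List String) (out : Int) : Prop := out = check_applause_alt n l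
instance (n : Int) (l : List String) (out : Int) : Decidable (Spec_check_applause n l out) := by
  unfold Spec_check_applause; infer_instance

-- ===== CLAIM =====
def Claim_equal_check_applause : Prop := ∀ (n : Int) (l : List String), Dom_check_applause n l → Pre_check_applause n l → Spec_check_applause n l (check_applause n l)

-- ===== LEMMAS AND PROOFS =====

-- tail of the prefix-sums list after a running sum s
def pvScan (s : Int) : List Int → List Int
  | [] => []
  | v :: vs => (s + v) :: pvScan (s + v) vs

-- the deficit candidates, as direct structural recursion with running index i and sum s
def pvCands (i s : Int) : List Int → List Int
  | [] => []
  | v :: vs => if v > 0 then (i - s) :: pvCands (i + 1) (s + v) vs else pvCands (i + 1) (s + v) vs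

-- one-pass running-max specification linking the two ports
def pvM (i s ans : Int) : List Int → Int
  | [] => ans
  | v :: vs => pvM (i + 1) (s + v) (if v > 0 then max ans (i - s) else ans) vs

theorem pvSums_foldl (vs : List Int) (init : List Int) (s : Int) :
    vs.foldl (fun acc v => acc ++ [PySem.List.pyGetD acc (-1) 0 + v]) (init ++ [s]) =
      init ++ [s] ++ (pvScan s vs).map id := by
  induction vs generalizing init s with
  | nil => simp [pvScan]
  | cons v vs ih =>
    simp only [List.foldl_cons, PySem.List.pyGetD_neg_one_append_singleton, pvScan]
    have := ih (init ++ [s]) (s + v)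
    simpa [List.append_assoc] using this

theorem pvCands_eq (vs : List Int) (i s : Int) :
    (PySem.List.enumerate (vs.zip (s :: pvScan s vs)) i).filterMap
        (fun p => if p.2.1 > 0 then some (p.1 - p.2.2) else none) =
      pvCands i s vs := by
  induction vs generalizing i s with
  | nil => simp [pvScan, pvCands, PySem.List.enumerate_nil]
  | cons v vs ih =>
    simp only [pvScan, List.zip_cons_cons, PySem.List.enumerate_cons, List.filterMap_cons, pvCands]
    by_cases hv : v > 0
    · simp [hv, ih (i + 1) (s + v)]
    · simp [hv, ih (i + 1) (s + v)]

theorem pvFoldlMax_comm (L : List Int) (a b : Int) :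
    max (L.foldl max a) b = L.foldl max (max a b) := by
  induction L generalizing a with
  | nil => rfl
  | cons x L ih =>
    simp only [List.foldl_cons]
    rw [ih (max a x)]
    congr 1
    omega

theorem pvM_eq_foldl (vs : List Int) (i s ans : Int) :
    pvM i s ans vs = (pvCands i s vs).foldl max ans := by
  induction vs generalizing i s ans with
  | nil => rfl
  | cons v vs ih =>
    simp only [pvM, pvCands]
    by_cases hv : v > 0
    · simp [hv, ih]
    · simp [hv, ih]

-- Invariant: A's total equals prefix sum plus the running answer; A's friends = running answer.
theorem check_applause_go_eq (l : List String) (i s ans : Int)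
    (h : ∀ x ∈ l, 0 ≤ (PySem.Int.ofStr? x).getD 0) :
    check_applause_goA i (s + ans) ans l =
      pvM i s ans (l.map (fun x => (PySem.Int.ofStr? x).getD 0)) := by
  induction l generalizing i s ans with
  | nil => rfl
  | cons x xs ih =>
    have hx : 0 ≤ (PySem.Int.ofStr? x).getD 0 := h x (by simp)
    have hxs : ∀ y ∈ xs, 0 ≤ (PySem.Int.ofStr? y).getD 0 := fun y hy => h y (by simp [hy])
    simp only [check_applause_goA, List.map_cons, pvM]
    set v := (PySem.Int.ofStr? x).getD 0 with hv
    by_cases hge : s + ans ≥ i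
    · have hmax : (if v > 0 then max ans (i - s) else ans) = ans := by
        split_ifs <;> omega
      rw [if_pos hge, hmax]
      have : s + ans + v = (s + v) + ans := by ring
      rw [this]
      exact ih (i + 1) (s + v) ans hxs
    · rw [if_neg hge]
      by_cases hvpos : v > 0
      · rw [if_pos hvpos]
        have hmax : (if v > 0 then max ans (i - s) else ans) = i - s := by
          rw [if_pos hvpos]; omega
        rw [hmax]
        have h2 : i + v = (s + v) + (i - s) := by ring
        rw [show ans + (i - (s + ans)) = i - s by ring, h2]
        exact ih (i + 1) (s + v) (i - s) hxs
      · rw [if_neg hvpos]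
        have hv0 : v = 0 := by omega
        have hmax : (if v > 0 then max ans (i - s) else ans) = ans := by
          rw [if_neg hvpos]
        rw [hmax]
        have h1 : s + ans = (s + v) + ans := by omega
        rw [h1]
        exact ih (i + 1) (s + v) ans hxs

-- B's staged passes compute foldl max 0 over the candidates.
theorem check_applause_alt_eq (n : Int) (l : List String) :
    check_applause_alt n l =
      (pvCands 0 0 (l.map (fun x => (PySem.Int.ofStr? x).getD 0))).foldl max 0 := by
  simp only [check_applause_alt]
  set vs := l.map (fun x => (PySem.Int.ofStr? x).getD 0) with hvs
  have hsums : vs.foldl (fun acc v => acc ++ [PySem.List.pyGetD acc (-1) 0 + v]) [0] =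
      0 :: pvScan 0 vs := by
    have := pvSums_foldl vs [] 0
    simpa using this
  rw [hsums, pvCands_eq vs 0 0]
  cases hc : pvCands 0 0 vs with
  | nil => simp
  | cons c cs =>
    simp only [List.cons_append, List.foldl_append, List.foldl_cons, List.foldl_nil]
    rw [pvFoldlMax_comm]
    congr 1
    omega

-- ===== VERDICT =====
theorem check_applause_spec : Claim_equal_check_applause := by
  intro n l _ hpre
  unfold Spec_check_applause check_applause
  rw [check_applause_alt_eq, ← pvM_eq_foldl]
  have := check_applause_go_eq l 0 0 0 (fun x hx => (hpre x hx).2)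
  simpa using this
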